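-- pv_equiv track=rewrite | github.com/andrewschultz/miscellany | puzzles/m3.py | no_backtracks
-- ===== SOURCE A (Python) =====
-- def no_backtracks(str):
--     if 'DU' in str or 'UD' in str or 'LR' in str or 'RL' in str: return False
--     # bad hack that works only because 3 moves. With more, we need to plot points out.
--     return True
--     j = defaultdict(bool)
--     j['0-0'] = True
--     x = 0
--     y = 0
--     for a in str:
--         if a == 'D': y = y + 1
--         if a == 'U': y = y - 1
--         if a == 'L': x = x - 1
--         if a == 'R': x = x + 1
--         q = '{:d}-{:d}'.format(x,y)
--         if q in j.keys(): return False
--         j[q] = True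
--     return True
-- ===== SOURCE B (Python) =====
-- def no_backtracks(str):
--     OPP = {'D': 'U', 'U': 'D', 'L': 'R', 'R': 'L'}
--     prev = None
--     for ch in str:
--         if prev is not None and OPP.get(prev) == ch:
--             return False
--         prev = ch
--     return True
-- ===== Notes on version B (the rewrite author's own statement) =====
-- stated objective: alternative
-- what changed: Replaced A's four independent full-string substring scans by a single streaming state machine that carries the previous move and rejects when the current character equals the previous move's opposite taken from an opposite-direction map.
import Mathlib
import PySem

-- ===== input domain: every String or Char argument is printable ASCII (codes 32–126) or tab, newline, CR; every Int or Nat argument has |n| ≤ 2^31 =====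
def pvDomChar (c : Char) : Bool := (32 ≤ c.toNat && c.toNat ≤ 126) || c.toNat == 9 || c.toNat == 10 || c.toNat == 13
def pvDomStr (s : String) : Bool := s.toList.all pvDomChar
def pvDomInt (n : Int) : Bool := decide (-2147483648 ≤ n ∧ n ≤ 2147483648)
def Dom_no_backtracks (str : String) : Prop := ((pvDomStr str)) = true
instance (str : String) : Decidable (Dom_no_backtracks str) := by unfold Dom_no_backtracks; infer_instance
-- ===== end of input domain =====

-- B replaces A's four full-string substring scans by a single streaming state machine carrying the previous move and an opposite-direction map (alternative; same cost).


-- ===== PORT A =====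
-- (the code after A's 'return True' is unreachable and is not ported)
def no_backtracks (str : String) : Bool :=
  if PySem.Str.isIn "DU" str || PySem.Str.isIn "UD" str ||
     PySem.Str.isIn "LR" str || PySem.Str.isIn "RL" str then false
  else true

-- ===== PORT B =====
-- the OPP dict of Source B
def nbOpp : PySem.Dict Char Char :=
  PySem.Dict.ofList [('D','U'), ('U','D'), ('L','R'), ('R','L')]

-- the 'for ch in str' loop with early return, state = prev : Option Char
def nbAltGo (prev : Option Char) : List Char → Bool
  | [] => true
  | ch :: rest =>
    match prev with
    | some p => if PySem.Dict.get? nbOpp p == some ch then false else nbAltGo (some ch) rest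
    | none => nbAltGo (some ch) rest

def no_backtracks_alt (str : String) : Bool :=
  nbAltGo none str.toList

-- ===== PRECONDITION & SPEC =====
def Spec_no_backtracks (str : String) (out : Bool) : Prop := out = no_backtracks_alt str
instance (str : String) (out : Bool) : Decidable (Spec_no_backtracks str out) := by unfold Spec_no_backtracks; infer_instance

-- ===== CLAIM (what is proved, stated in full; the proofs are below) =====
def Claim_equal_no_backtracks : Prop := ∀ (str : String), Dom_no_backtracks str → Spec_no_backtracks str (no_backtracks str)

-- ===== LEMMAS AND PROOFS =====

theorem pair_infix (a b : Char) : ∀ (l : List Char),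
    ([a, b] <:+: l) ↔ ∃ p ∈ l.zip l.tail, p = (a, b) := by
  intro l
  induction l with
  | nil => simp
  | cons x t ih =>
    cases t with
    | nil =>
      constructor
      · intro h; have := h.length_le; simp at this
      · simp
    | cons y r =>
      rw [List.infix_cons_iff]
      constructor
      · rintro (hp | hi)
        · rcases hp with ⟨s, hs⟩
          simp at hs
          exact ⟨(x, y), by simp, by simp [← hs.1, ← hs.2.1]⟩
        · rcases (ih.mp hi) with ⟨p, hp, he⟩
          exact ⟨p, by simp [List.zip]; right; simpa [List.zip] using hp, he⟩
      · rintro ⟨p, hp, rfl⟩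
        simp [List.zip] at hp
        rcases hp with ⟨ha, hb⟩ | hp
        · left; exact ⟨r, by simp [ha, hb]⟩
        · right; exact ih.mpr ⟨(a, b), by simpa [List.zip] using hp, rfl⟩

theorem anyor {α : Type} (l : List α) (f g : α → Bool) :
    (l.any fun x => f x || g x) = (l.any f || l.any g) := by
  induction l with
  | nil => rfl
  | cons x t ih =>
    simp only [List.any_cons, ih]
    cases f x <;> cases g x <;> simp

-- the state machine's rejection test on a pair, as a Bool
def nbBad (p : Char × Char) : Bool := PySem.Dict.get? nbOpp p.1 == some p.2

theorem hbad (p : Char × Char) :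
    nbBad p = (p == ('D','U') || (p == ('U','D') || (p == ('L','R') || p == ('R','L')))) := by
  rcases p with ⟨a, b⟩
  have hmk : nbOpp = PySem.Dict.mk [('D','U'), ('U','D'), ('L','R'), ('R','L')] := by decide
  simp only [nbBad, hmk]
  rw [Bool.eq_iff_iff]
  simp [PySem.Dict.get?_mk_cons, Prod.ext_iff]
  split_ifs with h1 h2 h3 h4
  · subst h1; simp [eq_comm]
  · subst h2; simp [eq_comm]
  · subst h3; simp [eq_comm]
  · subst h4; simp [eq_comm]
  · simp [PySem.Dict.get?]
    refine ⟨fun h => absurd h.symm h1, fun h => absurd h.symm h2, fun h => absurd h.symm h3, fun h => absurd h.symm h4⟩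

theorem go_eq (l : List Char) : ∀ (p : Char),
    nbAltGo (some p) l = !(((p :: l).zip l).any nbBad) := by
  induction l with
  | nil => intro p; rfl
  | cons ch rest ih =>
    intro p
    simp only [nbAltGo, List.zip_cons_cons, List.any_cons, Bool.not_or]
    by_cases h : PySem.Dict.get? nbOpp p == some ch
    · simp [h, nbBad]
    · have : nbBad (p, ch) = false := by simp [nbBad]; simpa using h
      simp [h, this, ih ch]

theorem alt_eq (s : String) :
    no_backtracks_alt s = !((s.toList.zip s.toList.tail).any nbBad) := by
  unfold no_backtracks_alt
  cases hl : s.toList with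
  | nil => rfl
  | cons c rest =>
    show nbAltGo (some c) rest = _
    rw [go_eq]
    rfl

theorem hiso (s : String) (a b : Char) (sub : String) (hsub : sub.toList = [a, b]) :
    PySem.Str.isIn sub s = (s.toList.zip s.toList.tail).any (fun p => p == (a, b)) := by
  rcases hz : (s.toList.zip s.toList.tail).any (fun p => p == (a, b)) with _ | _
  · simp only [List.any_eq_false] at hz
    have hni : ¬ [a, b] <:+: s.toList := by
      intro hinf
      rcases (pair_infix a b s.toList).mp hinf with ⟨p, hp, he⟩
      exact absurd (by simp [he]) (hz p hp)
    rw [← hsub] at hni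
    simpa using (Bool.not_eq_true _).mp (fun h => hni ((PySem.Str.isIn_iff_infix _ _).mp h))
  · simp only [List.any_eq_true] at hz
    rcases hz with ⟨p, hp, he⟩
    have he' : p = (a, b) := by simpa using he
    have : sub.toList <:+: s.toList := by
      rw [hsub]; exact (pair_infix a b s.toList).mpr ⟨p, hp, he'⟩
    exact (PySem.Str.isIn_iff_infix _ _).mpr this

-- ===== VERDICT (by name: the statement is the Claim_ definition above) =====
theorem no_backtracks_spec : Claim_equal_no_backtracks := by
  intro s _
  unfold Spec_no_backtracks no_backtracks
  rw [alt_eq]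
  rw [show nbBad = fun p => (p == ('D','U') || (p == ('U','D') || (p == ('L','R') || p == ('R','L')))) from funext hbad]
  simp only [anyor]
  rw [hiso s 'D' 'U' "DU" rfl, hiso s 'U' 'D' "UD" rfl,
      hiso s 'L' 'R' "LR" rfl, hiso s 'R' 'L' "RL" rfl]
  generalize (s.toList.zip s.toList.tail).any (fun p => p == ('D','U')) = b1
  generalize (s.toList.zip s.toList.tail).any (fun p => p == ('U','D')) = b2
  generalize (s.toList.zip s.toList.tail).any (fun p => p == ('L','R')) = b3
  generalize (s.toList.zip s.toList.tail).any (fun p => p == ('R','L')) = b4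
  cases b1 <;> cases b2 <;> cases b3 <;> cases b4 <;> rfl
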